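-- pv_equiv track=rewrite | github.com/christopheradolphe/Python-School-Projects | Practice Exam 2016.py | has_single_peak
-- ===== SOURCE A (Python) =====
-- def has_single_peak(L):
--     increasing_or_decreasing_list = []
--     count = 0
--     for i in range(1, len(L)):
--         if L[i] > L[i-1]:
--             increasing_or_decreasing_list.append("increasing")
--         if L[i] < L[i-1]:
--             increasing_or_decreasing_list.append("decreasing")
--     for i in range(1, len(increasing_or_decreasing_list)):
--         if increasing_or_decreasing_list[i] == "increasing" and increasing_or_decreasing_list[i-1] == "decreasing":
--             return False
--
--     else:
--         return True
-- ===== SOURCE B (Python) =====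
-- def has_single_peak(L):
--     n = len(L)
--     i = 1
--     # climb: absorb the ascending phase (>= absorbs plateaus)
--     while i < n and L[i] >= L[i-1]:
--         i += 1
--     # descend: absorb the descending phase (<= absorbs plateaus)
--     while i < n and L[i] <= L[i-1]:
--         i += 1
--     return i >= n
-- ===== Notes on version B (the rewrite author's own statement) =====
-- stated objective: idiomatic
-- what changed: Replaced A's two passes (build a list of 'increasing'/'decreasing' label strings, then scan it for a decrease followed by an increase) with a direct two-pointer climb-then-descend scan over the list itself, no intermediate list.
import Mathlib
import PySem

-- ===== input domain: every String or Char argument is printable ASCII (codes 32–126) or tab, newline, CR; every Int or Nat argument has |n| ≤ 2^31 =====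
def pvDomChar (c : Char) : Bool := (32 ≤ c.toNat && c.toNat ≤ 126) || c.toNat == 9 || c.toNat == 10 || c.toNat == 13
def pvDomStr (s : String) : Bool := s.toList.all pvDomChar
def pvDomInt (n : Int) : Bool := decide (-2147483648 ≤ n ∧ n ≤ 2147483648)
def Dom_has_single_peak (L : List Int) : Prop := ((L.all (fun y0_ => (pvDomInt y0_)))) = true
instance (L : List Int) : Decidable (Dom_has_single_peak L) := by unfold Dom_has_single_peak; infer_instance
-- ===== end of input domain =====

-- B replaces A's label-list construction + scan with a single two-pointer climb-then-descend pass (idiomatic, no intermediate list).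
-- ===== PORT A =====
-- labels of adjacent pairs: "increasing"/"decreasing", equal pairs skipped (A's first loop)
def pvLabels : Int → List Int → List String
  | _, [] => []
  | prev, x :: xs =>
    (if x > prev then ["increasing"] else []) ++
    (if x < prev then ["decreasing"] else []) ++ pvLabels x xs

-- A's second loop: prev = labels[i-1], s = labels[i]
def pvScanLabels : String → List String → Bool
  | _, [] => true
  | prev, s :: ss => if s = "increasing" ∧ prev = "decreasing" then false else pvScanLabels s ss

def has_single_peak (L : List Int) : Bool :=
  match L with
  | [] => true
  | x :: xs =>
    match pvLabels x xs with
    | [] => true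
    | l :: ls => pvScanLabels l ls

-- ===== PORT B =====
-- B's second while loop: prev = L[i-1]
def pvDescend : Int → List Int → Bool
  | _, [] => true
  | prev, y :: ys => if y ≤ prev then pvDescend y ys else false

-- B's first while loop; on exit control falls to the descend loop at the same index
def pvClimb : Int → List Int → Bool
  | _, [] => true
  | prev, y :: ys => if y ≥ prev then pvClimb y ys else pvDescend prev (y :: ys)

def has_single_peak_alt (L : List Int) : Bool :=
  match L with
  | [] => true
  | x :: xs => pvClimb x xs

-- ===== PRECONDITION & SPEC =====
def Spec_has_single_peak (L : List Int) (out : Bool) : Prop := out = has_single_peak_alt L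
instance (L : List Int) (out : Bool) : Decidable (Spec_has_single_peak L out) := by unfold Spec_has_single_peak; infer_instance

-- ===== CLAIM (what is proved, stated in full; the proofs are below) =====
def Claim_equal_has_single_peak : Prop := ∀ (L : List Int), Dom_has_single_peak L → Spec_has_single_peak L (has_single_peak L)

-- ===== LEMMAS AND PROOFS =====

lemma scan_dec_eq_descend : ∀ (ys : List Int) (p : Int),
    pvScanLabels "decreasing" (pvLabels p ys) = pvDescend p ys := by
  intro ys
  induction ys with
  | nil => intro p; rfl
  | cons z zs ih =>
    intro p
    rcases lt_trichotomy z p with h | h | h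
    · simp [pvLabels, pvDescend, pvScanLabels, h, not_lt.mpr (le_of_lt h), le_of_lt h, ih]
    · subst h; simp [pvLabels, pvDescend, ih]
    · simp [pvLabels, pvDescend, pvScanLabels, h, not_lt.mpr (le_of_lt h), not_le.mpr h]

lemma scan_inc (ls : List String) :
    pvScanLabels "increasing" ls =
      (match ls with | [] => true | l :: ls' => pvScanLabels l ls') := by
  cases ls with
  | nil => rfl
  | cons l ls' => simp [pvScanLabels]

lemma main_eq : ∀ (xs : List Int) (p : Int),
    (match pvLabels p xs with | [] => true | l :: ls => pvScanLabels l ls) = pvClimb p xs := by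
  intro xs
  induction xs with
  | nil => intro p; rfl
  | cons y ys ih =>
    intro p
    rcases lt_trichotomy y p with h | h | h
    · simp only [pvLabels, pvClimb, if_neg (not_lt.mpr (le_of_lt h)), if_pos h,
        if_neg (not_le.mpr h), List.nil_append, List.singleton_append,
        pvDescend, if_pos (le_of_lt h)]
      exact scan_dec_eq_descend ys y
    · subst h
      simp only [pvLabels, pvClimb, lt_irrefl, if_pos (le_refl y)]
      exact ih y
    · simp only [pvLabels, pvClimb, if_pos h, if_neg (not_lt.mpr (le_of_lt h)),
        if_pos (le_of_lt h), List.singleton_append]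
      rw [← ih y]
      exact scan_inc (pvLabels y ys)

-- ===== VERDICT (by name: the statement is the Claim_ definition above) =====
theorem has_single_peak_spec : Claim_equal_has_single_peak := by
  intro L _
  unfold Spec_has_single_peak has_single_peak has_single_peak_alt
  cases L with
  | nil => rfl
  | cons x xs => exact main_eq xs x
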